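-- pv_equiv track=rewrite | github.com/ilijavucetic/AnomalyDetection | GPS_Algorithm/main_2.py | calculate_support
-- ===== SOURCE A (Python) =====
-- def calculate_support(items, sequences):
--     items_support = {}
--
--     for item in items:
--         items_support[item] = 0
--         for sequence in sequences:
--             for sequence_elements in sequence:
--                 if item in sequence_elements:
--                     items_support[item] += 1
--                     break
--     return items_support
-- ===== SOURCE B (Python) =====
-- def calculate_support(items, sequences):
--     counts = {}
--     for sequence in sequences:
--         present = set()
--         for elements in sequence:
--             present.update(elements)
--         for v in present:
--             counts[v] = counts.get(v, 0) + 1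
--     return {item: counts.get(item, 0) for item in items}
-- ===== Notes on version B (the rewrite author's own statement) =====
-- stated objective: faster
-- what changed: B replaces A's per-item rescan of every sequence with a single pass over the sequences that builds each sequence's set of present items and a count dictionary, then reads each item's count off the dictionary.
import Mathlib
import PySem

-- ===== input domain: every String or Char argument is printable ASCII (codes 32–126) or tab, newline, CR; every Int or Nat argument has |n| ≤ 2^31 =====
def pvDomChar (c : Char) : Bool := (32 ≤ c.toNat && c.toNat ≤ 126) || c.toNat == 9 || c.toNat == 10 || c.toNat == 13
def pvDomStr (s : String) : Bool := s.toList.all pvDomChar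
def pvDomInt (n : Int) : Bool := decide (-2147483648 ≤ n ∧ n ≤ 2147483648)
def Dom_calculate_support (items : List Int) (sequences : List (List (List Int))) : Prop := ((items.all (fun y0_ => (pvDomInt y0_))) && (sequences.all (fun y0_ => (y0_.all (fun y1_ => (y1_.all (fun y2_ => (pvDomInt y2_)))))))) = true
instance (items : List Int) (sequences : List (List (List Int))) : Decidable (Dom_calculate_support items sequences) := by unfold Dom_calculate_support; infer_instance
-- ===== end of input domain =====

-- B changes the algorithm: one pass over sequences building a per-sequence present-set and a
-- count dictionary, instead of A's rescanning all sequences for every item (objective: faster).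

-- ===== PORT A =====
-- inner 'for sequence_elements in sequence: … break' loop of A, as structural recursion
def aSeqLoop (item : Int) (d : PySem.Dict Int Int) : List (List Int) → PySem.Dict Int Int
  | [] => d
  | es :: rest =>
      if es.contains item then d.modify item 0 (· + 1) else aSeqLoop item d rest

def calculate_support (items : List Int) (sequences : List (List (List Int))) : List (Int × Int) :=
  (items.foldl
    (fun d item => sequences.foldl (fun d sequence => aSeqLoop item d sequence) (d.insert item 0))
    PySem.Dict.empty).items

-- ===== PORT B =====
-- 'present = set(); for elements in sequence: present.update(elements)'
def bPresent (sequence : List (List Int)) : PySem.Set Int :=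
  sequence.foldl (fun present elements => PySem.Set.update present elements) ([] : PySem.Set Int)

def calculate_support_alt (items : List Int) (sequences : List (List (List Int))) : List (Int × Int) :=
  let counts := sequences.foldl
    (fun counts sequence =>
      (bPresent sequence).foldl (fun counts v => counts.insert v (counts.getD v 0 + 1)) counts)
    PySem.Dict.empty
  (items.foldl (fun d item => d.insert item (counts.getD item 0)) PySem.Dict.empty).items

-- ===== PRECONDITION & SPEC =====
def Spec_calculate_support (items : List Int) (sequences : List (List (List Int))) (out : List (Int × Int)) : Prop := out = calculate_support_alt items sequences
instance (items : List Int) (sequences : List (List (List Int))) (out : List (Int × Int)) : Decidable (Spec_calculate_support items sequences out) := by unfold Spec_calculate_support; infer_instance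

-- ===== CLAIM (what is proved, stated in full; the proofs are below) =====
def Claim_equal_calculate_support : Prop := ∀ (items : List Int) (sequences : List (List (List Int))), Dom_calculate_support items sequences → Spec_calculate_support items sequences (calculate_support items sequences)

-- ===== LEMMAS AND PROOFS =====

-- the support count both programs compute for one item
def supportOf (sequences : List (List (List Int))) (item : Int) : Int :=
  (sequences.countP (fun s => s.any (fun es => es.contains item)) : Int)

lemma aSeqLoop_insert (item : Int) (d : PySem.Dict Int Int) (c : Int) (seq : List (List Int)) :
    aSeqLoop item (d.insert item c) seq
      = d.insert item (if seq.any (fun es => es.contains item) then c + 1 else c) := by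
  induction seq with
  | nil => simp [aSeqLoop]
  | cons es rest ih =>
      by_cases h : item ∈ es
      · simp [aSeqLoop, List.contains_iff_mem, h, PySem.Dict.modify,
          PySem.Dict.getD_insert_self, PySem.Dict.insert_insert_self]
      · simp [aSeqLoop, List.contains_iff_mem, h, ih]

lemma aFold_insert (item : Int) (seqs : List (List (List Int))) (d : PySem.Dict Int Int) (c : Int) :
    seqs.foldl (fun d s => aSeqLoop item d s) (d.insert item c)
      = d.insert item (c + supportOf seqs item) := by
  induction seqs generalizing c with
  | nil => simp [supportOf]
  | cons s rest ih =>
      simp only [List.foldl_cons, aSeqLoop_insert, ih, supportOf, List.countP_cons]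
      simp only [List.any_eq_true, List.contains_iff_mem]
      by_cases h : ∃ x ∈ s, item ∈ x <;> simp [h] <;> push_cast <;> ring

lemma mem_bPresent (seq : List (List Int)) (v : Int) :
    v ∈ bPresent seq ↔ ∃ es ∈ seq, v ∈ es := by
  unfold bPresent
  have : ∀ (l : List (List Int)) (s : PySem.Set Int),
      v ∈ l.foldl (fun p es => PySem.Set.update p es) s ↔ v ∈ s ∨ ∃ es ∈ l, v ∈ es := by
    intro l
    induction l with
    | nil => simp
    | cons es rest ih =>
        intro s
        simp [ih, PySem.Set.mem_update]
        tauto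
  simp [this]

lemma nodup_bPresent (seq : List (List Int)) : (bPresent seq).Nodup := by
  unfold bPresent
  have : ∀ (l : List (List Int)) (s : PySem.Set Int), s.Nodup →
      (l.foldl (fun p es => PySem.Set.update p es) s).Nodup := by
    intro l
    induction l with
    | nil => exact fun s h => h
    | cons es rest ih => exact fun s h => ih _ (PySem.Set.nodup_update s es h)
  exact this seq [] List.nodup_nil

lemma count_bPresent (seq : List (List Int)) (v : Int) :
    (bPresent seq).count v = (if seq.any (fun es => es.contains v) then 1 else 0) := by
  by_cases h : v ∈ bPresent seq
  · have h1 : (bPresent seq).count v = 1 := List.count_eq_one_of_mem (nodup_bPresent seq) h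
    have h2 : ∃ es ∈ seq, v ∈ es := (mem_bPresent seq v).1 h
    simp [h1, h2]
  · have h1 : (bPresent seq).count v = 0 := List.count_eq_zero.2 h
    have h2 : ¬ ∃ es ∈ seq, v ∈ es := fun hx => h ((mem_bPresent seq v).2 hx)
    simp [h1, h2]

lemma counts_getD (seqs : List (List (List Int))) (d : PySem.Dict Int Int) (v : Int) :
    (seqs.foldl
      (fun counts sequence =>
        (bPresent sequence).foldl (fun counts w => counts.insert w (counts.getD w 0 + 1)) counts)
      d).getD v 0
      = d.getD v 0 + supportOf seqs v := by
  induction seqs generalizing d with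
  | nil => simp [supportOf]
  | cons s rest ih =>
      simp only [List.foldl_cons, ih]
      have : ((bPresent s).foldl (fun counts w => counts.insert w (counts.getD w 0 + 1)) d).getD v 0
          = d.getD v 0 + (bPresent s).count v :=
        PySem.Dict.getD_foldl_modify_add_one (bPresent s) d v
      rw [this, count_bPresent, supportOf, supportOf, List.countP_cons]
      simp only [List.any_eq_true, List.contains_iff_mem]
      by_cases h : ∃ x ∈ s, v ∈ x <;> simp [h] <;> push_cast <;> ring

-- ===== VERDICT (by name: the statement is the Claim_ definition above) =====
theorem calculate_support_spec : Claim_equal_calculate_support := by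
  intro items sequences _
  unfold Spec_calculate_support calculate_support calculate_support_alt
  congr 1
  apply PySem.List.foldl_congr_mem
  intro d item _
  rw [aFold_insert, counts_getD]
  simp
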